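-- pv_equiv track=rewrite | github.com/BeiJiXing-Zero/network-calculator | network_calculator.py | cidr_to_mask
-- ===== SOURCE A (Python) =====
-- def cidr_to_mask(cidr):
--     cidr = int(cidr)
--     if not 0 <= cidr <= 32:
--         return None
--     binary = "1" * cidr + "0" * (32 - cidr)
--     octets = [int(binary[i:i+8], 2) for i in range(0, 32, 8)]
--     mask = ".".join(map(str, octets))
--     binary_display = ".".join([binary[i:i+8] for i in range(0, 32, 8)])
--     return {"mask": mask, "binary": binary_display}
-- ===== SOURCE B (Python) =====
-- def cidr_to_mask(cidr):
--     cidr = int(cidr)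
--     if not 0 <= cidr <= 32:
--         return None
--     mask_int = (0xFFFFFFFF << (32 - cidr)) & 0xFFFFFFFF
--     octets = [(mask_int >> s) & 0xFF for s in (24, 16, 8, 0)]
--     return {"mask": ".".join(str(o) for o in octets),
--             "binary": ".".join(format(o, "08b") for o in octets)}
-- ===== Notes on version B (the rewrite author's own statement) =====
-- stated objective: idiomatic
-- what changed: B computes the netmask as a 32-bit integer ((0xFFFFFFFF << (32-cidr)) & 0xFFFFFFFF) and derives each octet by shifting and masking, instead of A's building a 32-character binary string and slicing/parsing it.
import Mathlib
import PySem

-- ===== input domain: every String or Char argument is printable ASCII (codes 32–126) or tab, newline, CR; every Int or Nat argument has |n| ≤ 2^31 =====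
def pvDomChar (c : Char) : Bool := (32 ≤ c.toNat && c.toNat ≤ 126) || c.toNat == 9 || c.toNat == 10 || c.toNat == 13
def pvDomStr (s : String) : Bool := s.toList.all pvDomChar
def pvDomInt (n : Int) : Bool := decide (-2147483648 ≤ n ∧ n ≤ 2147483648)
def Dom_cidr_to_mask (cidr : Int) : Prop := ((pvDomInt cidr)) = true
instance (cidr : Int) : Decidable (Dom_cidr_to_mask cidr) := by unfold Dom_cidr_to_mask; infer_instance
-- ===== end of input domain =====

-- B computes the mask by 32-bit shift/mask arithmetic on integers instead of building
-- and slicing a 32-character binary string (objective: idiomatic; same cost).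

-- ===== PORT A =====
-- A builds "1"*cidr + "0"*(32-cidr), slices it into 8-char chunks, parses each with int(_, 2).
def cidr_to_mask (cidr : Int) : Option (List (String × String)) :=
  if ¬ (0 ≤ cidr ∧ cidr ≤ 32) then none
  else
    let binary : List Char :=
      List.replicate cidr.toNat '1' ++ List.replicate (32 - cidr).toNat '0'
    let octets : List Int :=
      (PySem.List.pyRange 0 32 8).map (fun i =>
        (PySem.Int.ofStrBase?
          (String.ofList (PySem.List.slice binary (some i) (some (i + 8)))) 2).getD 0)
        -- int(chunk, 2); the guard makes every chunk an 8-char '0'/'1' string, so it never raises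
    let mask : String := PySem.Str.join "." (octets.map PySem.Int.toStr)
    let binary_display : String :=
      PySem.Str.join "." ((PySem.List.pyRange 0 32 8).map (fun i =>
        String.ofList (PySem.List.slice binary (some i) (some (i + 8)))))
    some [("mask", mask), ("binary", binary_display)]

-- ===== PORT B =====
-- format(o, '08b'): the 8 bits of o, most significant first
def pvBits8 (o : Nat) : String :=
  String.ofList ((List.range 8).map (fun i => if (o >>> (7 - i)) &&& 1 == 1 then '1' else '0'))

def cidr_to_mask_alt (cidr : Int) : Option (List (String × String)) :=
  if ¬ (0 ≤ cidr ∧ cidr ≤ 32) then none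
  else
    let maskInt : Nat := (0xFFFFFFFF <<< (32 - cidr).toNat) &&& 0xFFFFFFFF
    let octets : List Nat := [24, 16, 8, 0].map (fun s => (maskInt >>> s) &&& 0xFF)
    some [("mask", PySem.Str.join "." (octets.map (fun o => PySem.Int.toStr (o : Int)))),
          ("binary", PySem.Str.join "." (octets.map pvBits8))]

-- ===== PRECONDITION & SPEC =====
def Spec_cidr_to_mask (cidr : Int) (out : Option (List (String × String))) : Prop := out = cidr_to_mask_alt cidr
instance (cidr : Int) (out : Option (List (String × String))) : Decidable (Spec_cidr_to_mask cidr out) := by unfold Spec_cidr_to_mask; infer_instance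

-- ===== CLAIM (what is proved, stated in full; the proofs are below) =====
def Claim_equal_cidr_to_mask : Prop := ∀ (cidr : Int), Dom_cidr_to_mask cidr → Spec_cidr_to_mask cidr (cidr_to_mask cidr)

-- ===== LEMMAS AND PROOFS =====

-- ===== VERDICT (by name: the statement is the Claim_ definition above) =====
theorem cidr_to_mask_spec : Claim_equal_cidr_to_mask := by
  intro cidr _
  unfold Spec_cidr_to_mask
  by_cases h : 0 ≤ cidr ∧ cidr ≤ 32
  · obtain ⟨h0, h32⟩ := h
    interval_cases cidr <;> decide
  · simp only [cidr_to_mask, cidr_to_mask_alt, h, not_false_iff, if_pos]
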